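-- pv_equiv track=rewrite | github.com/Coding-Algorithm-for-the-Last-time/Today-I-solved | 07_02_Greedy/93_1_Split_With_Minimum_Sum/hoetaek.py | combine_to_two_num
-- ===== SOURCE A (Python) =====
-- def combine_to_two_num(num_li):
--     two_num_li = [0, 0]
--
--     get_or_default = lambda li, index, default: li[index] if index < len(li) else default
--
--     for i in range(0, len(num_li), 2):
--         for j in range(len(two_num_li)):
--             num = get_or_default(num_li, i+j, 0)
--             if num != 0:
--                 two_num_li[j] = two_num_li[j] * 10 + num
--
--     return two_num_li
-- ===== SOURCE B (Python) =====
-- def combine_to_two_num(num_li):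
--     # split into the two parity groups first, then fold each group on its own
--     evens, odds, flip = [], [], True
--     for v in num_li:
--         if flip:
--             evens.append(v)
--         else:
--             odds.append(v)
--         flip = not flip
--
--     def fold(group):
--         n = 0
--         for d in group:
--             if d != 0:
--                 n = n * 10 + d
--         return n
--
--     return [fold(evens), fold(odds)]
-- ===== Notes on version B (the rewrite author's own statement) =====
-- stated objective: alternative
-- what changed: Replaces A's single interleaved pass (range step-2 outer loop, inner loop over the two slots, with a get_or_default bounds helper) by splitting the list into its two parity groups first and then folding each group independently with n = n*10 + d on nonzero digits.
import Mathlib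
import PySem

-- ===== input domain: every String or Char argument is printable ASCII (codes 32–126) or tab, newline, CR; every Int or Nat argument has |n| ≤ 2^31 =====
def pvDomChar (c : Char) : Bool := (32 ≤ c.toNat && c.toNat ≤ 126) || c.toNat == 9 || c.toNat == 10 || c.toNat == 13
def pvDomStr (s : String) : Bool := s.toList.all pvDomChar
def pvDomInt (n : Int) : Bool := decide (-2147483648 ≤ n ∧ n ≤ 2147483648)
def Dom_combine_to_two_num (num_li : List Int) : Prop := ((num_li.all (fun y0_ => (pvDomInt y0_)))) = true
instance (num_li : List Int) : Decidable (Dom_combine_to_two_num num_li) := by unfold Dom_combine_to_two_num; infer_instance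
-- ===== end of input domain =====

-- B splits the list into its two parity groups up front and folds each group in its own pass,
-- replacing A's single interleaved nested-loop pass with index arithmetic (objective: alternative decomposition, same cost).

-- ===== PORT A =====
-- literal port of A: two_num_li = [0,0]; for i in range(0, len, 2): for j in range(len(two_num_li)):
-- num = li[i+j] if i+j < len else 0; if num != 0: two_num_li[j] = two_num_li[j]*10 + num.
-- j ranges over {0,1} (nonnegative), so reading two_num_li[j] is pyGetD and writing is List.set j.toNat — exact here.
def combine_to_two_num (num_li : List Int) : List Int :=
  let get_or_default := fun (li : List Int) (index : Int) (default : Int) =>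
    if index < (li.length : Int) then PySem.List.pyGetD li index default else default
  (PySem.List.pyRange 0 (num_li.length : Int) 2).foldl (fun two_num_li i =>
    (PySem.List.pyRange 0 (two_num_li.length : Int) 1).foldl (fun tw j =>
      let num := get_or_default num_li (i + j) 0
      if num ≠ 0 then tw.set j.toNat (PySem.List.pyGetD tw j 0 * 10 + num) else tw)
      two_num_li) [0, 0]

-- ===== PORT B =====
-- the inner 'fold' helper of Source B
def pvFoldGroup (group : List Int) : Int :=
  group.foldl (fun n d => if d ≠ 0 then n * 10 + d else n) 0

-- one toggle step of Source B's splitting loop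
def pvSplitStep (st : List Int × List Int × Bool) (v : Int) : List Int × List Int × Bool :=
  let (evens, odds, flip) := st
  if flip then (evens ++ [v], odds, !flip) else (evens, odds ++ [v], !flip)

def combine_to_two_num_alt (num_li : List Int) : List Int :=
  let st := num_li.foldl pvSplitStep ([], [], true)
  [pvFoldGroup st.1, pvFoldGroup st.2.1]

-- ===== PRECONDITION & SPEC =====
def Spec_combine_to_two_num (num_li : List Int) (out : List Int) : Prop := out = combine_to_two_num_alt num_li
instance (num_li : List Int) (out : List Int) : Decidable (Spec_combine_to_two_num num_li out) := by unfold Spec_combine_to_two_num; infer_instance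

-- ===== CLAIM (what is proved, stated in full; the proofs are below) =====
def Claim_equal_combine_to_two_num : Prop := ∀ (num_li : List Int), Dom_combine_to_two_num num_li → Spec_combine_to_two_num num_li (combine_to_two_num num_li)

-- ===== LEMMAS AND PROOFS =====

def pvUpd (x a : Int) : Int := if a ≠ 0 then x * 10 + a else x

-- joint characterisation of A's nested loop: consume the list two elements at a time
def pvAux : List Int → Int → Int → Int × Int
  | [], x, y => (x, y)
  | [a], x, y => (pvUpd x a, y)
  | a :: b :: t, x, y => pvAux t (pvUpd x a) (pvUpd y b)

-- parity groups
def pvEvens : List Int → List Int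
  | [] => []
  | [a] => [a]
  | a :: _ :: t => a :: pvEvens t

def pvOdds : List Int → List Int
  | [] => []
  | [_] => []
  | _ :: b :: t => b :: pvOdds t

theorem pyRange_two_nil (a b : Int) (h : b ≤ a) : PySem.List.pyRange a b 2 = [] := by
  rw [PySem.List.pyRange_of_pos a b (by norm_num)]
  simp [if_neg (by omega : ¬ a < b)]

theorem pyRange_two_cons (a b : Int) (h : a < b) :
    PySem.List.pyRange a b 2 = a :: PySem.List.pyRange (a + 2) b 2 := by
  rw [PySem.List.pyRange_of_pos a b (by norm_num), PySem.List.pyRange_of_pos (a+2) b (by norm_num)]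
  rw [if_pos h]
  by_cases h2 : a + 2 < b
  · rw [if_pos h2]
    have hn : ((b - a + 2 - 1) / 2).toNat = ((b - (a + 2) + 2 - 1) / 2).toNat + 1 := by omega
    rw [hn, List.range_succ_eq_map]
    simp [List.map_map, Function.comp]
    intro k _
    ring
  · rw [if_neg h2]
    have hn : ((b - a + 2 - 1) / 2).toNat = 1 := by omega
    rw [hn]
    simp

theorem pvAux_fst_snd (xs : List Int) (x y : Int) :
    pvAux xs x y = ((pvEvens xs).foldl pvUpd x, (pvOdds xs).foldl pvUpd y) := by
  induction xs using pvEvens.induct generalizing x y with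
  | case1 => simp [pvAux, pvEvens, pvOdds]
  | case2 a => simp [pvAux, pvEvens, pvOdds, List.foldl]
  | case3 a b t ih => simp [pvAux, pvEvens, pvOdds, ih]

-- A's outer loop, started at offset k with accumulator [x, y], computes pvAux on the suffix
theorem outer_loop (num_li : List Int) (xs : List Int) :
    ∀ (k : Nat) (x y : Int), num_li.drop k = xs →
    (PySem.List.pyRange (k : Int) (num_li.length : Int) 2).foldl (fun tw2 i =>
      (PySem.List.pyRange 0 ((tw2.length : Nat) : Int) 1).foldl (fun tw j =>
        let num := if i + j < (num_li.length : Int) then PySem.List.pyGetD num_li (i + j) 0 else 0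
        if num ≠ 0 then tw.set j.toNat (PySem.List.pyGetD tw j 0 * 10 + num) else tw)
        tw2) [x, y]
    = [(pvAux xs x y).1, (pvAux xs x y).2] := by
  induction xs using pvEvens.induct with
  | case1 =>
    intro k x y hdrop
    have hk : (num_li.length : Int) ≤ (k : Int) := by
      have := congrArg List.length hdrop
      simp at this; exact_mod_cast by omega
    rw [pyRange_two_nil _ _ hk]
    simp [pvAux]
  | case2 a =>
    intro k x y hdrop
    have hlen : num_li.length = k + 1 := by
      have := congrArg List.length hdrop
      simp at this; omega
    have hklt : (k : Int) < (num_li.length : Int) := by exact_mod_cast by omega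
    rw [pyRange_two_cons _ _ hklt]
    have hget : PySem.List.pyGetD num_li (k : Int) 0 = a := by
      rw [PySem.List.pyGetD_eq_getElem]
      · have : num_li[k]? = some a := by
          have h0 : (num_li.drop k)[0]? = some a := by rw [hdrop]; rfl
          rw [List.getElem?_drop] at h0; simpa using h0
        simp [List.getElem?_eq_some_iff] at this
        obtain ⟨h1, h2⟩ := this
        simp [h2]
      · omega
      · exact_mod_cast by omega
    simp only [List.foldl_cons]
    have hr2 : PySem.List.pyRange 0 (((List.length [x, y] : Nat) : Int)) 1 = [0, 1] := by
      simp only [List.length_cons, List.length_nil]; decide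
    rw [hr2]
    simp only [List.foldl_cons, List.foldl_nil]
    rw [pyRange_two_nil _ _ (by omega)]
    simp only [List.foldl_nil]
    -- evaluate the two inner steps
    have hoob : ¬ ((k : Int) + 1 < (num_li.length : Int)) := by
      rw [hlen]; push_cast; omega
    simp only [add_zero, if_pos hklt, hget, if_neg hoob, pvAux, pvUpd]
    by_cases ha : a ≠ 0
    · simp [ha, PySem.List.pyGetD]
    · simp [ha]
  | case3 a b t ih =>
    intro k x y hdrop
    have hlen : k + 2 ≤ num_li.length := by
      have := congrArg List.length hdrop
      simp at this; omega
    have hklt : (k : Int) < (num_li.length : Int) := by exact_mod_cast by omega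
    have hget : PySem.List.pyGetD num_li (k : Int) 0 = a := by
      rw [PySem.List.pyGetD_eq_getElem]
      · have : num_li[k]? = some a := by
          have h0 : (num_li.drop k)[0]? = some a := by rw [hdrop]; rfl
          rw [List.getElem?_drop] at h0; simpa using h0
        simp [List.getElem?_eq_some_iff] at this
        obtain ⟨h1, h2⟩ := this
        simp [h2]
      · omega
      · exact_mod_cast by omega
    have hklt1 : (k : Int) + 1 < (num_li.length : Int) := by
      have : ((k + 1 : Nat) : Int) < (num_li.length : Int) := by exact_mod_cast by omega
      push_cast at this ⊢; omega
    have hget1 : PySem.List.pyGetD num_li ((k : Int) + 1) 0 = b := by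
      have hcast : ((k : Int) + 1) = ((k + 1 : Nat) : Int) := by push_cast; ring
      rw [hcast, PySem.List.pyGetD_eq_getElem]
      · have : num_li[k+1]? = some b := by
          have h0 : (num_li.drop k)[1]? = some b := by rw [hdrop]; rfl
          rw [List.getElem?_drop] at h0; simpa using h0
        simp [List.getElem?_eq_some_iff] at this
        obtain ⟨h1, h2⟩ := this
        simp [h2]
      · omega
      · exact_mod_cast by omega
    rw [pyRange_two_cons _ _ hklt]
    simp only [List.foldl_cons]
    have hr2 : PySem.List.pyRange 0 (((List.length [x, y] : Nat) : Int)) 1 = [0, 1] := by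
      simp only [List.length_cons, List.length_nil]; decide
    rw [hr2]
    simp only [List.foldl_cons, List.foldl_nil, add_zero, if_pos hklt, hget, if_pos hklt1, hget1]
    have hdrop2 : num_li.drop (k + 2) = t := by
      have h2 := congrArg (List.drop 2) hdrop
      rw [List.drop_drop] at h2
      simp at h2
      exact h2
    -- reduce the two set/pyGetD steps to pvUpd on each component
    have e1 : (if a ≠ 0 then ([x, y].set ((0:Int)).toNat (PySem.List.pyGetD [x, y] 0 0 * 10 + a) : List Int) else [x, y]) = [pvUpd x a, y] := by
      by_cases ha : a ≠ 0 <;> simp [ha, pvUpd, PySem.List.pyGetD]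
    have e2 : ∀ x', (if b ≠ 0 then ([x', y].set ((1:Int)).toNat (PySem.List.pyGetD [x', y] 1 0 * 10 + b) : List Int) else [x', y]) = [x', pvUpd y b] := by
      intro x'
      by_cases hb : b ≠ 0 <;> simp [hb, pvUpd, PySem.List.pyGetD]
    rw [e1, e2]
    have hcast2 : ((k : Int) + 2) = ((k + 2 : Nat) : Int) := by push_cast; ring
    rw [hcast2, ih (k + 2) (pvUpd x a) (pvUpd y b) hdrop2]
    simp [pvAux]

-- B's split pass produces exactly the parity groups
theorem split_eq (xs : List Int) : ∀ (e o : List Int),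
    xs.foldl pvSplitStep (e, o, true)
    = (e ++ pvEvens xs, o ++ pvOdds xs, (xs.foldl pvSplitStep (e, o, true)).2.2) := by
  induction xs using pvEvens.induct with
  | case1 => intro e o; simp [pvEvens, pvOdds]
  | case2 a => intro e o; simp [pvEvens, pvOdds, pvSplitStep]
  | case3 a b t ih =>
    intro e o
    have hab : pvSplitStep (pvSplitStep (e, o, true) a) b = (e ++ [a], o ++ [b], true) := by
      simp [pvSplitStep]
    simp only [List.foldl_cons, hab]
    rw [ih (e ++ [a]) (o ++ [b])]
    simp [pvEvens, pvOdds]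

-- ===== VERDICT (by name: the statement is the Claim_ definition above) =====
theorem combine_to_two_num_spec : Claim_equal_combine_to_two_num := by
  intro num_li _
  show combine_to_two_num num_li = combine_to_two_num_alt num_li
  have hA : combine_to_two_num num_li = [(pvAux num_li 0 0).1, (pvAux num_li 0 0).2] := by
    have := outer_loop num_li num_li 0 0 0 (by simp)
    simpa [combine_to_two_num] using this
  have hB : combine_to_two_num_alt num_li = [(pvEvens num_li).foldl pvUpd 0, (pvOdds num_li).foldl pvUpd 0] := by
    unfold combine_to_two_num_alt
    rw [split_eq num_li [] []]
    have hf : (fun (n d : Int) => if d ≠ 0 then n * 10 + d else n) = pvUpd := by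
      funext n d; by_cases h : d = 0 <;> simp [pvUpd, h]
    simp only [List.nil_append, pvFoldGroup, hf]
  rw [hA, hB, pvAux_fst_snd]
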